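-- pv_equiv track=rewrite | github.com/parc-nsi/premiere-nsi-parc | chapitre7/correction/Images-Tableaux2d-Eleves-Partie1-Correction.py | drapeau_3bandes_verticales
-- ===== SOURCE A (Python) =====
-- def matrice_vide(ncol, nlig, mode):
--     """Retourne une matrice de pixels de n lignes et m colonnes
--     représentant une image noire dans le mode  d'image choisi"""
--     assert mode in ['1', 'L', 'RGB'], "mode doit appartenir à ['1', 'L', 'RGB']"
--     if mode in ['1', 'L']:
--         return [[0 for x in range(ncol)] for y in range(nlig)]
--     else:
--         return [[[0,0,0] for x in range(ncol)] for y in range(nlig)]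
--
-- def drapeau_3bandes_verticales(nlig, ncol, couleur1, couleur2, couleur3):
--     """Retourne la matrice de pixels de l'image d'un drapeau
--     comportant trois bandes verticales de couleurs couleur1, couleur2, couleur3"""
--     #on crée une matrice vide de bonnes dimensions
--     pix = matrice_vide(ncol, nlig, 'RGB')
--     tiers_colonne = ncol // 3
--     deux_tiers_colonne = 2 * tiers_colonne
--     for x in range(ncol): #boucle sur les colonnes
--         for y in range(nlig): #boucle sur les lignes
--             if   x < tiers_colonne:
--                 pix[y][x] = couleur1
--             elif x < deux_tiers_colonne:
--                 pix[y][x] = couleur2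
--             else:
--                 pix[y][x] = couleur3
--     return pix
-- ===== SOURCE B (Python) =====
-- def drapeau_3bandes_verticales(nlig, ncol, couleur1, couleur2, couleur3):
--     """Retourne la matrice de pixels de l'image d'un drapeau
--     comportant trois bandes verticales de couleurs couleur1, couleur2, couleur3"""
--     tiers = ncol // 3
--     # the band colour depends only on the column: compute one row, then tile it
--     rangee = [couleur1 if x < tiers else couleur2 if x < 2 * tiers else couleur3
--               for x in range(ncol)]
--     return [list(rangee) for y in range(nlig)]
-- ===== Notes on version B (the rewrite author's own statement) =====
-- stated objective: simpler
-- what changed: B computes the per-column colour row once and tiles it for every line, instead of pre-allocating a black RGB matrix and overwriting every cell in a column-by-row double loop.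
import Mathlib
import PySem

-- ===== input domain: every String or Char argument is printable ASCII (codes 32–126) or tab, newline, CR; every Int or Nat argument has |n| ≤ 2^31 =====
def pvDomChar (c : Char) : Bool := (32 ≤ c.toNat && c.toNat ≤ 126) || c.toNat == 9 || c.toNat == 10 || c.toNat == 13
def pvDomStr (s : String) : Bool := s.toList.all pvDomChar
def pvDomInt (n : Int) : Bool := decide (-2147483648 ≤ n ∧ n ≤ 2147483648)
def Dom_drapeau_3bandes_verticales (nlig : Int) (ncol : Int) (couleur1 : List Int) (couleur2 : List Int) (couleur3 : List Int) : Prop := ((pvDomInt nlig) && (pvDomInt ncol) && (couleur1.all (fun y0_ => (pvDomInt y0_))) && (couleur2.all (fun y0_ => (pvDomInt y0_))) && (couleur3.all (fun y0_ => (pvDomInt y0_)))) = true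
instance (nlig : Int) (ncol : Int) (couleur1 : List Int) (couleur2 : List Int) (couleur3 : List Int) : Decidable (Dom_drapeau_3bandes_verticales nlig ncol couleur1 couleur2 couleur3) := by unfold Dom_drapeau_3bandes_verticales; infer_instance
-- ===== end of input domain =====

-- B computes the per-column colour row once and tiles it for every line, instead of A's
-- pre-allocated black matrix overwritten cell by cell (objective: simpler).

-- ===== PORT A =====
def drapeau_3bandes_verticales (nlig : Int) (ncol : Int) (couleur1 : List Int) (couleur2 : List Int) (couleur3 : List Int) : List (List (List Int)) :=
  -- pix = matrice_vide(ncol, nlig, 'RGB')  (inlined helper, 'RGB' branch)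
  let pix : List (List (List Int)) :=
    (PySem.List.pyRange 0 nlig).map (fun _ => (PySem.List.pyRange 0 ncol).map (fun _ => ([0, 0, 0] : List Int)))
  let tiers_colonne := PySem.Int.floordiv ncol 3
  let deux_tiers_colonne := 2 * tiers_colonne
  (PySem.List.pyRange 0 ncol).foldl (fun pix x =>
    (PySem.List.pyRange 0 nlig).foldl (fun pix y =>
      pix.modify y.toNat (fun row => row.set x.toNat
        (if x < tiers_colonne then couleur1
         else if x < deux_tiers_colonne then couleur2
         else couleur3))) pix) pix

-- ===== PORT B =====
def drapeau_3bandes_verticales_alt (nlig : Int) (ncol : Int) (couleur1 : List Int) (couleur2 : List Int) (couleur3 : List Int) : List (List (List Int)) :=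
  let tiers := PySem.Int.floordiv ncol 3
  let rangee : List (List Int) :=
    (PySem.List.pyRange 0 ncol).map (fun x =>
      if x < tiers then couleur1 else if x < 2 * tiers then couleur2 else couleur3)
  (PySem.List.pyRange 0 nlig).map (fun _ => rangee)

-- ===== PRECONDITION & SPEC =====
def Spec_drapeau_3bandes_verticales (nlig : Int) (ncol : Int) (couleur1 : List Int) (couleur2 : List Int) (couleur3 : List Int) (out : List (List (List Int))) : Prop := out = drapeau_3bandes_verticales_alt nlig ncol couleur1 couleur2 couleur3
instance (nlig : Int) (ncol : Int) (couleur1 : List Int) (couleur2 : List Int) (couleur3 : List Int) (out : List (List (List Int))) : Decidable (Spec_drapeau_3bandes_verticales nlig ncol couleur1 couleur2 couleur3 out) := by unfold Spec_drapeau_3bandes_verticales; infer_instance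

-- ===== CLAIM (what is proved, stated in full; the proofs are below) =====
def Claim_equal_drapeau_3bandes_verticales : Prop := ∀ (nlig : Int) (ncol : Int) (couleur1 : List Int) (couleur2 : List Int) (couleur3 : List Int), Dom_drapeau_3bandes_verticales nlig ncol couleur1 couleur2 couleur3 → Spec_drapeau_3bandes_verticales nlig ncol couleur1 couleur2 couleur3 (drapeau_3bandes_verticales nlig ncol couleur1 couleur2 couleur3)

-- ===== LEMMAS AND PROOFS =====

-- pyRange 0 b for an arbitrary Int bound, as a mapped Nat range (empty when b ≤ 0)
theorem pyRange_zero_toNat (b : Int) :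
    PySem.List.pyRange 0 b = List.map (fun k : Nat => (k : Int)) (List.range b.toNat) := by
  by_cases h : 0 ≤ b
  · conv_lhs => rw [show b = (b.toNat : Int) by omega]
    exact PySem.List.pyRange_zero_natCast b.toNat
  · rw [show b.toNat = 0 by omega]
    simp [PySem.List.pyRange]
    omega

-- folding `modify` over a duplicate-free index list, seen through getElem?
theorem getElem?_foldl_modify {α : Type} (g : α → α) (l : List Nat) (hl : l.Nodup)
    (pix : List α) (j : Nat) :
    (l.foldl (fun p y => p.modify y g) pix)[j]? =
      if j ∈ l then g <$> pix[j]? else pix[j]? := by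
  induction l generalizing pix with
  | nil => simp
  | cons y ys ih =>
    simp only [List.foldl_cons]
    rw [ih hl.of_cons]
    rcases eq_or_ne j y with rfl | hne
    · have hj : j ∉ ys := (List.nodup_cons.mp hl).1
      simp [hj]
    · simp [hne, Ne.symm hne]

-- folding `set` over a duplicate-free index list, seen through getElem?
theorem getElem?_foldl_set {α : Type} (v : Nat → α) (l : List Nat) (hl : l.Nodup)
    (r : List α) (i : Nat) :
    (l.foldl (fun r x => r.set x (v x)) r)[i]? =
      if i ∈ l ∧ i < r.length then some (v i) else r[i]? := by
  induction l generalizing r with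
  | nil => simp
  | cons x xs ih =>
    simp only [List.foldl_cons]
    rw [ih hl.of_cons]
    rcases eq_or_ne i x with rfl | hne
    · have hi : i ∉ xs := (List.nodup_cons.mp hl).1
      by_cases hlen : i < r.length <;> simp [hi, hlen]
    · simp [hne, Ne.symm hne]

-- A's column-then-line double loop, seen through getElem? on the line index:
-- each line of the matrix receives the same fold of `set`s over the columns
theorem getElem?_outer {β : Type} (w : Nat → β) (n : Nat) (xs : List Nat)
    (pix : List (List β)) (j : Nat) :
    (xs.foldl (fun p x =>
        (List.range n).foldl (fun p y => p.modify y (fun row => row.set x (w x))) p) pix)[j]? =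
      if j < n then (fun row => xs.foldl (fun r x => r.set x (w x)) row) <$> pix[j]?
      else pix[j]? := by
  induction xs generalizing pix with
  | nil =>
    simp only [List.foldl_nil]
    split <;> simp
  | cons x xs ih =>
    simp only [List.foldl_cons]
    rw [ih]
    rw [getElem?_foldl_modify _ _ (List.nodup_range) pix j]
    simp only [List.mem_range]
    by_cases hj : j < n
    · simp [hj, Option.map_map, Function.comp_def]
    · simp [hj]

-- ===== VERDICT (by name: the statement is the Claim_ definition above) =====
theorem drapeau_3bandes_verticales_spec : Claim_equal_drapeau_3bandes_verticales := by
  intro nlig ncol c1 c2 c3 _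
  unfold Spec_drapeau_3bandes_verticales drapeau_3bandes_verticales drapeau_3bandes_verticales_alt
  simp only [pyRange_zero_toNat, List.foldl_map, List.map_map, Int.toNat_natCast,
    Function.comp_def]
  apply List.ext_getElem?
  intro j
  rw [getElem?_outer]
  simp only [List.getElem?_map]
  by_cases hj : j < nlig.toNat
  · rw [List.getElem?_range hj]
    simp only [hj, if_pos, Option.map_some]
    refine congrArg some ?_
    apply List.ext_getElem?
    intro i
    rw [getElem?_foldl_set _ _ (List.nodup_range)]
    simp only [List.mem_range, List.length_map, List.length_range]
    by_cases hi : i < ncol.toNat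
    · simp [hi]
    · rw [if_neg (by simp [hi])]
      rw [List.getElem?_eq_none (by simp [Nat.le_of_not_lt hi]),
          List.getElem?_eq_none (by simp [Nat.le_of_not_lt hi])]
  · simp [hj]
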